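-- pv_equiv track=rewrite | github.com/hurryingauto3/Grade-Optimizer | GUI Files/Project Backend Files/help.py | Enqueue
-- ===== SOURCE A (Python) =====
-- def Enqueue(queue, item, priority):
--     length=len(queue)
--     tup=(item, priority)
--     c=0
--     for original in queue:
--         alphabet, priority2 = original
--         if priority<priority2:
--             queue.insert(c, tup)
--             return queue
--         c+=1
--     queue.insert(length, tup)
--     return queue
-- ===== SOURCE B (Python) =====
-- def Enqueue(queue, item, priority):
--     # One-pass rebuild with a 'placed' flag instead of an indexed scan + positional
--     # insert; writes the rebuilt list back in place (same mutation as A).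
--     out = []
--     placed = False
--     for t in queue:
--         if not placed and priority < t[1]:
--             out.append((item, priority))
--             placed = True
--         out.append(t)
--     if not placed:
--         out.append((item, priority))
--     queue[:] = out
--     return queue
-- ===== Notes on version B (the rewrite author's own statement) =====
-- stated objective: alternative
-- what changed: Replaces the counter-driven scan with list.insert(c, tup) by a single flag-driven pass that rebuilds the list, emitting the new pair just before the first strictly greater priority (or at the end), then writes it back in place.
import Mathlib
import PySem

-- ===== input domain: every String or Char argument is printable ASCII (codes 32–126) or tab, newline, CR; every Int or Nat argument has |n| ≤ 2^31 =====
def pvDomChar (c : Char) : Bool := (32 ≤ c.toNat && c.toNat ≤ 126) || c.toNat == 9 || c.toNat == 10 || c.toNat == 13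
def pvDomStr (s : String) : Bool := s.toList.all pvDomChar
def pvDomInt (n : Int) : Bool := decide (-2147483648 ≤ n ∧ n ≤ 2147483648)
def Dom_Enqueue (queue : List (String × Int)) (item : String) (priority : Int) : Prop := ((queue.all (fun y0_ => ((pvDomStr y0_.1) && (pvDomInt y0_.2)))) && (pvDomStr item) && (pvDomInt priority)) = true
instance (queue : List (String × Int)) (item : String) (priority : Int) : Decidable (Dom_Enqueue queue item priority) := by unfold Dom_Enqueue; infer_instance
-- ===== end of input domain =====

-- B replaces A's counter-driven scan + positional insert by a structural recursion
-- rebuilding the list (same return value; B performs the equivalent in-place mutation).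


-- ===== PORT A =====
-- A's for-loop with counter c: returns `some` of the inserted list on early return, `none` if the loop ends.
def EnqueueLoop (queue : List (String × Int)) (tup : String × Int) (priority : Int) :
    List (String × Int) → Int → Option (List (String × Int))
  | [], _ => none
  | original :: rest, c =>
      if priority < original.2 then some (PySem.List.insert queue c tup)
      else EnqueueLoop queue tup priority rest (c + 1)

def Enqueue (queue : List (String × Int)) (item : String) (priority : Int) : List (String × Int) :=
  let length : Int := queue.length
  let tup := (item, priority)
  match EnqueueLoop queue tup priority queue 0 with
  | some r => r
  | none => PySem.List.insert queue length tup

-- ===== PORT B =====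
-- B's loop body: accumulator is (out, placed).
def EnqStep (item : String) (priority : Int)
    (acc : List (String × Int) × Bool) (t : String × Int) : List (String × Int) × Bool :=
  if !acc.2 && decide (priority < t.2) then (acc.1 ++ [(item, priority), t], true)
  else (acc.1 ++ [t], acc.2)

def Enqueue_alt (queue : List (String × Int)) (item : String) (priority : Int) : List (String × Int) :=
  let r := queue.foldl (EnqStep item priority) ([], false)
  if r.2 then r.1 else r.1 ++ [(item, priority)]

-- ===== PRECONDITION & SPEC =====
def Spec_Enqueue (queue : List (String × Int)) (item : String) (priority : Int) (out : List (String × Int)) : Prop := out = Enqueue_alt queue item priority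
instance (queue : List (String × Int)) (item : String) (priority : Int) (out : List (String × Int)) : Decidable (Spec_Enqueue queue item priority out) := by unfold Spec_Enqueue; infer_instance

-- ===== CLAIM (what is proved, stated in full; the proofs are below) =====
def Claim_equal_Enqueue : Prop := ∀ (queue : List (String × Int)) (item : String) (priority : Int), Dom_Enqueue queue item priority → Spec_Enqueue queue item priority (Enqueue queue item priority)

-- ===== LEMMAS AND PROOFS =====
-- proof-side helper: the common "insert before the first strictly greater priority" function
def insRec (item : String) (priority : Int) : List (String × Int) → List (String × Int)
  | [] => [(item, priority)]
  | t :: rest =>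
      if priority < t.2 then (item, priority) :: t :: rest
      else t :: insRec item priority rest

lemma foldl_placed (item : String) (priority : Int) :
    ∀ (suf : List (String × Int)) (acc : List (String × Int)),
      suf.foldl (EnqStep item priority) (acc, true) = (acc ++ suf, true) := by
  intro suf
  induction suf with
  | nil => intro acc; simp
  | cons t rest ih =>
      intro acc
      simp [EnqStep, ih]

lemma foldl_not_placed (item : String) (priority : Int) :
    ∀ (suf : List (String × Int)) (acc : List (String × Int)),
      (let r := suf.foldl (EnqStep item priority) (acc, false)
       if r.2 then r.1 else r.1 ++ [(item, priority)])
      = acc ++ insRec item priority suf := by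
  intro suf
  induction suf with
  | nil => intro acc; simp [insRec]
  | cons t rest ih =>
      intro acc
      by_cases h : priority < t.2
      · simp [EnqStep, insRec, h, foldl_placed]
      · have := ih (acc ++ [t])
        simp only [List.foldl_cons, EnqStep, h]
        simpa [insRec, h] using this

lemma alt_eq_insRec (queue : List (String × Int)) (item : String) (priority : Int) :
    Enqueue_alt queue item priority = insRec item priority queue := by
  have := foldl_not_placed item priority queue []
  simpa [Enqueue_alt] using this

lemma enqueueLoop_eq (item : String) (priority : Int) :
    ∀ (suf pre : List (String × Int)),
      (match EnqueueLoop (pre ++ suf) (item, priority) priority suf (pre.length : Int) with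
        | some r => r
        | none => PySem.List.insert (pre ++ suf) ((pre ++ suf).length : Int) (item, priority))
      = pre ++ insRec item priority suf := by
  intro suf
  induction suf with
  | nil =>
      intro pre
      simp [EnqueueLoop, insRec, PySem.List.insert_length]
  | cons t rest ih =>
      intro pre
      by_cases h : priority < t.2
      · have hle : pre.length ≤ (pre ++ t :: rest).length := by simp
        simp [EnqueueLoop, insRec, h, PySem.List.insert_natCast _ _ _ hle]
      · have h2 := ih (pre ++ [t])
        have hlen : ((pre ++ [t]).length : Int) = (pre.length : Int) + 1 := by
          simp
        rw [List.append_assoc] at h2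
        simp only [List.singleton_append] at h2
        rw [hlen] at h2
        simp only [EnqueueLoop, insRec, if_neg h]
        rw [h2]
        simp

-- ===== VERDICT (by name: the statement is the Claim_ definition above) =====
theorem Enqueue_spec : Claim_equal_Enqueue := by
  intro queue item priority _
  unfold Spec_Enqueue Enqueue
  rw [alt_eq_insRec]
  have h := enqueueLoop_eq item priority queue []
  simpa using h
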